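-- pv_equiv track=rewrite | github.com/MaartenLangen/PangenomesAsGraphDatabases | pirateToDatabase.py | determineVariation
-- ===== SOURCE A (Python) =====
-- def determineVariation(seq: str, refSeq: str) -> str:
--     """ Compares seq to refSeq and returns the differences as a string.
--
--     ## Input
--     - seq: str with sequence to be compared
--     - refSeq: str with sequence to compare to
--
--     ## Output
--     - DELTA: 'comressed' difference. Format: alternating number and nucleotide,
--     with number indicating distance from previous difference.
--     """
--
--     previousDiff = 0
--     DELTA = ''
--     if seq is refSeq:
--         return DELTA
--     else:
--         for i in range(0,len(seq)):
--             if seq[i] != refSeq[i]: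
--                 dist = i - previousDiff
--                 DELTA = DELTA + str(dist) + seq[i]
--                 previousDiff = i
--         return DELTA
-- ===== SOURCE B (Python) =====
-- def determineVariation(seq: str, refSeq: str) -> str:
--     """Reverse-scan re-implementation: walk the sequence from the END,
--     building the encoding back-to-front.  The gap of a difference depends on
--     the difference to its LEFT, so each difference is encoded only when the
--     next one (to the left) is found; it is kept 'pending' until then."""
--     if seq is refSeq:
--         return ''
--     out = ''
--     pending = None  # position of the nearest difference to the right, not yet encoded
--     for i in reversed(range(len(seq))):
--         if seq[i] != refSeq[i]:
--             if pending is not None: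
--                 out = str(pending - i) + seq[pending] + out
--             pending = i
--     if pending is not None:
--         out = str(pending) + seq[pending] + out
--     return out
-- ===== Notes on version B (the rewrite author's own statement) =====
-- stated objective: alternative
-- what changed: B scans the sequence in REVERSE and builds the encoding back-to-front: each difference is held pending and only encoded (gap = pending - i) when the next difference to its left is found, instead of A's forward scan with a previousDiff accumulator.
import Mathlib
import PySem

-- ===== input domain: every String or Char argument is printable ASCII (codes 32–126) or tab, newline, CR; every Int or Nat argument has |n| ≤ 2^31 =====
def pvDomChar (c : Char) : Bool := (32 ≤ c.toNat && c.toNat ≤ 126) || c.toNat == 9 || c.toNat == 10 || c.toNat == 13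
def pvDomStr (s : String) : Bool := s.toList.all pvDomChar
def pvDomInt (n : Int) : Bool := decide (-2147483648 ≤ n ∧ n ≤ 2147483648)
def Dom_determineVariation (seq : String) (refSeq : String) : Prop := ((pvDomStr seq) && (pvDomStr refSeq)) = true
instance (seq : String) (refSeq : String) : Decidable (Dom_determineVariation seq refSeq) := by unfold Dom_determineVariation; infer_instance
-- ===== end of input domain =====

-- B replaces A's forward scan (previousDiff accumulator, forward concatenation) by a
-- REVERSE scan that builds the encoding back-to-front with a pending difference;
-- return values proved equal on all inputs where A returns
-- (Pre_ only excludes refSeq shorter than seq, where Python A raises IndexError).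


-- ===== PORT A =====
-- A's loop body; indexing uses getD (Pre_ guarantees every index is in range,
-- so this matches Python's seq[i]/refSeq[i], which would raise only outside Pre_).
def dvStepA (s r : List Char) (st : Int × String) (i : Nat) : Int × String :=
  if s.getD i ' ' ≠ r.getD i ' ' then
    (Int.ofNat i, st.2 ++ PySem.Int.toStr ((Int.ofNat i) - st.1) ++ String.mk [s.getD i ' '])
  else st

-- 'if seq is refSeq' ported as string equality: when the strings are equal the loop
-- finds no differences and also returns '', so the return value is identical either way.
def determineVariation (seq : String) (refSeq : String) : String :=
  if seq == refSeq then "" else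
    ((List.range seq.toList.length).foldl (dvStepA seq.toList refSeq.toList) (0, "")).2

-- ===== PORT B =====
-- B's reverse-loop body: state = (pending difference position, output built so far).
def dvStepB (s r : List Char) (st : Option Nat × String) (i : Nat) : Option Nat × String :=
  if s.getD i ' ' ≠ r.getD i ' ' then
    match st.1 with
    | some p => (some i, PySem.Int.toStr ((Int.ofNat p) - (Int.ofNat i)) ++ String.mk [s.getD p ' '] ++ st.2)
    | none => (some i, st.2)
  else st

def determineVariation_alt (seq : String) (refSeq : String) : String :=
  if seq == refSeq then "" else
    match ((List.range seq.toList.length).reverse).foldl (dvStepB seq.toList refSeq.toList) (none, "") with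
    | (some p, out) => PySem.Int.toStr (Int.ofNat p) ++ String.mk [seq.toList.getD p ' '] ++ out
    | (none, out) => out

-- ===== PRECONDITION & SPEC =====
-- Pre_ excludes exactly the inputs where Python A raises IndexError (refSeq shorter than seq).
def Pre_determineVariation (seq : String) (refSeq : String) : Prop :=
  seq.toList.length ≤ refSeq.toList.length
instance (seq : String) (refSeq : String) : Decidable (Pre_determineVariation seq refSeq) := by
  unfold Pre_determineVariation; infer_instance

def pvWitness_determineVariation : String × String := ("ACGT", "AGGA")

def Spec_determineVariation (seq : String) (refSeq : String) (out : String) : Prop := out = determineVariation_alt seq refSeq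
instance (seq : String) (refSeq : String) (out : String) : Decidable (Spec_determineVariation seq refSeq out) := by unfold Spec_determineVariation; infer_instance

-- ===== CLAIM (what is proved, stated in full; the proofs are below) =====
def Claim_equal_determineVariation : Prop := ∀ (seq : String) (refSeq : String), Dom_determineVariation seq refSeq → Pre_determineVariation seq refSeq → Spec_determineVariation seq refSeq (determineVariation seq refSeq)

-- ===== LEMMAS AND PROOFS =====

-- reference recursion: A's encoding of the (unfiltered) index list
def dvG (s r : List Char) : List Nat → Int → String
  | [], _ => ""
  | i :: t, p =>
    if s.getD i ' ' ≠ r.getD i ' ' then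
      PySem.Int.toStr ((Int.ofNat i) - p) ++ String.mk [s.getD i ' '] ++ dvG s r t (Int.ofNat i)
    else dvG s r t p

-- the encoding of an already-filtered difference list, previous position p
def dvH (s : List Char) : List Nat → Int → String
  | [], _ => ""
  | i :: t, p => PySem.Int.toStr ((Int.ofNat i) - p) ++ String.mk [s.getD i ' '] ++ dvH s t (Int.ofNat i)

theorem dvFoldA (s r : List Char) (l : List Nat) (p : Int) (d : String) :
    (l.foldl (dvStepA s r) (p, d)).2 = d ++ dvG s r l p := by
  induction l generalizing p d with
  | nil => simp [dvG]
  | cons i t ih =>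
    simp only [List.foldl, dvStepA, dvG]
    split_ifs with h
    · rw [ih]; simp [String.append_assoc]
    · rw [ih]

theorem dvGH (s r : List Char) (l : List Nat) (p : Int) :
    dvG s r l p = dvH s (l.filter (fun i => s.getD i ' ' ≠ r.getD i ' ')) p := by
  induction l generalizing p with
  | nil => rfl
  | cons i t ih =>
    simp only [dvG, List.filter]
    split_ifs with h
    · have : (decide ¬s.getD i ' ' = r.getD i ' ') = true := by simpa using h
      rw [this]; simp [dvH, ih]
    · have : (decide ¬s.getD i ' ' = r.getD i ' ') = false := by simpa using h
      rw [this, ih]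

-- B's step with the mismatch test removed (for use on an already-filtered list)
def dvStepB' (s : List Char) (st : Option Nat × String) (i : Nat) : Option Nat × String :=
  match st.1 with
  | some p => (some i, PySem.Int.toStr ((Int.ofNat p) - (Int.ofNat i)) ++ String.mk [s.getD p ' '] ++ st.2)
  | none => (some i, st.2)

theorem dvFilterB (s r : List Char) (l : List Nat) (st : Option Nat × String) :
    l.foldl (dvStepB s r) st
      = (l.filter (fun i => s.getD i ' ' ≠ r.getD i ' ')).foldl (dvStepB' s) st := by
  induction l generalizing st with
  | nil => rfl
  | cons i t ih =>
    simp only [List.foldl, List.filter]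
    by_cases h : s.getD i ' ' ≠ r.getD i ' '
    · have hd : (decide ¬s.getD i ' ' = r.getD i ' ') = true := by simpa using h
      rw [hd]
      simp only [List.foldl]
      rw [← ih]
      have : dvStepB s r st i = dvStepB' s st i := by
        simp only [dvStepB, dvStepB', if_pos h]
      rw [this]
    · have hd : (decide ¬s.getD i ' ' = r.getD i ' ') = false := by simpa using h
      rw [hd]
      have : dvStepB s r st i = st := by
        simp only [dvStepB, if_neg h]
      rw [this, ih]

-- processing the REVERSED difference list leaves its head pending and the tail encoded
theorem dvRevFold (s : List Char) (l : List Nat) :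
    l.reverse.foldl (dvStepB' s) (none, "")
      = match l with
        | [] => (none, "")
        | d :: t => (some d, dvH s t (Int.ofNat d)) := by
  rw [List.foldl_reverse]
  induction l with
  | nil => rfl
  | cons d t ih =>
    simp only [List.foldr]
    rw [ih]
    cases t with
    | nil => rfl
    | cons d2 t2 => simp [dvStepB', dvH]

-- ===== VERDICT (by name: the statement is the Claim_ definition above) =====
theorem determineVariation_spec : Claim_equal_determineVariation := by
  intro seq refSeq _ _
  unfold Spec_determineVariation determineVariation determineVariation_alt
  split_ifs with h
  · rfl
  · rw [dvFoldA, dvGH, dvFilterB, List.filter_reverse, dvRevFold]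
    cases hd : (List.range seq.toList.length).filter
        (fun i => seq.toList.getD i ' ' ≠ refSeq.toList.getD i ' ') with
    | nil => simp [dvH]
    | cons d t => simp [dvH]
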